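-- pv_equiv track=rewrite | github.com/stefanfries/fastapi-azure-container-app | app/services/identifier_enrichment.py | _pick_composite_figi
-- ===== SOURCE A (Python) =====
-- from typing import Any, Optional
--
-- def _pick_composite_figi(records: list[dict[str, Any]]) -> Optional[str]:
--     """
--     Select the best compositeFIGI from a list of OpenFIGI mapping records.
--
--     Preference order:
--     1. US-listed equity record (most canonical for cross-listed instruments)
--     2. First record that has a non-null compositeFIGI
--
--     Args:
--         records: List of raw FIGI record dicts from the OpenFIGI API.
--
--     Returns:
--         compositeFIGI string, or None if unavailable.
--     """
--     if not records:
--         return None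
--
--     us_exch_codes = {"US", "UN", "UQ", "UA", "UP"}
--
--     for rec in records:
--         if rec.get("exchCode") in us_exch_codes and rec.get("compositeFIGI"):
--             return rec["compositeFIGI"]
--
--     for rec in records:
--         if rec.get("compositeFIGI"):
--             return rec["compositeFIGI"]
--
--     return None
-- ===== SOURCE B (Python) =====
-- from typing import Any, Optional
--
-- def _pick_composite_figi(records: list[dict[str, Any]]) -> Optional[str]:
--     fallback = None
--     us_exch_codes = {"US", "UN", "UQ", "UA", "UP"}
--     for rec in records:
--         figi = rec.get("compositeFIGI")
--         if figi and rec.get("exchCode") in us_exch_codes: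
--             return figi
--         if fallback is None and figi:
--             fallback = figi
--     return fallback
-- ===== Notes on version B (the rewrite author's own statement) =====
-- stated objective: simpler
-- what changed: Replaced A's two sequential scans (US-listed pass, then first-non-null pass) by a single loop that returns a US hit immediately and records the first non-null compositeFIGI in a fallback accumulator.
import Mathlib
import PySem

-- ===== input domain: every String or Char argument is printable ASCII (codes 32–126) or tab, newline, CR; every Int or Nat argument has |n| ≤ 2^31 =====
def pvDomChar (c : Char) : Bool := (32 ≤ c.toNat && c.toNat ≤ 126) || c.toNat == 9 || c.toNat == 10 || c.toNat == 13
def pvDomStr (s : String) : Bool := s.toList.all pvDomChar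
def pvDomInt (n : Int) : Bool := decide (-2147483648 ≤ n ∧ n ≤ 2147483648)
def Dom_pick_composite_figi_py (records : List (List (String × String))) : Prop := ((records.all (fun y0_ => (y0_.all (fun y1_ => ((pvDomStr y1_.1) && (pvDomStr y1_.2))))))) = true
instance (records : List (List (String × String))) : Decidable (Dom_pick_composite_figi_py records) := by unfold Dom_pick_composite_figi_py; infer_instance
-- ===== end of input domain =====

-- B replaces A's two sequential scans by one loop with a first-non-null fallback accumulator (objective: simpler).

-- shared dict semantics: rec.get(k) = first match in the association list
def pvGetRec (rec : List (String × String)) (k : String) : Option String :=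
  (PySem.Dict.mk rec).get? k

-- Python truthiness of an Optional[str]: None and "" are falsy
def pvTruthy (o : Option String) : Bool :=
  match o with
  | none => false
  | some s => s ≠ ""

-- rec.get("exchCode") in {"US","UN","UQ","UA","UP"} (None is never in the set)
def pvIsUS (rec : List (String × String)) : Bool :=
  match pvGetRec rec "exchCode" with
  | none => false
  | some c => c ∈ ["US", "UN", "UQ", "UA", "UP"]

-- ===== PORT A =====
-- first loop of A: return the first US-listed non-null compositeFIGI
def pvLoopUS (records : List (List (String × String))) : Option String :=
  match records with
  | [] => none
  | rec :: rest =>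
      if pvIsUS rec && pvTruthy (pvGetRec rec "compositeFIGI") then
        pvGetRec rec "compositeFIGI"
      else pvLoopUS rest

-- second loop of A: return the first non-null compositeFIGI
def pvLoopAny (records : List (List (String × String))) : Option String :=
  match records with
  | [] => none
  | rec :: rest =>
      if pvTruthy (pvGetRec rec "compositeFIGI") then
        pvGetRec rec "compositeFIGI"
      else pvLoopAny rest

def pick_composite_figi_py (records : List (List (String × String))) : Option String :=
  if records.isEmpty then none
  else
    match pvLoopUS records with
    | some s => some s
    | none => pvLoopAny records

-- ===== PORT B =====
-- single pass carrying the fallback accumulator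
def pvLoopB (records : List (List (String × String))) (fallback : Option String) : Option String :=
  match records with
  | [] => fallback
  | rec :: rest =>
      let figi := pvGetRec rec "compositeFIGI"
      if pvTruthy figi && pvIsUS rec then figi
      else pvLoopB rest (if fallback == none && pvTruthy figi then figi else fallback)

def pick_composite_figi_py_alt (records : List (List (String × String))) : Option String :=
  pvLoopB records none

-- ===== PRECONDITION & SPEC =====
def Spec_pick_composite_figi_py (records : List (List (String × String))) (out : Option String) : Prop := out = pick_composite_figi_py_alt records
instance (records : List (List (String × String))) (out : Option String) : Decidable (Spec_pick_composite_figi_py records out) := by unfold Spec_pick_composite_figi_py; infer_instance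

-- ===== CLAIM (what is proved, stated in full; the proofs are below) =====
def Claim_equal_pick_composite_figi_py : Prop := ∀ (records : List (List (String × String))), Dom_pick_composite_figi_py records → Spec_pick_composite_figi_py records (pick_composite_figi_py records)

-- ===== LEMMAS AND PROOFS =====

theorem pvTruthy_some {o : Option String} (h : pvTruthy o = true) : ∃ s, o = some s := by
  cases o with
  | none => simp [pvTruthy] at h
  | some s => exact ⟨s, rfl⟩

-- the one-pass loop equals: US hit, else the carried fallback, else the first non-null
theorem pvLoopB_eq (records : List (List (String × String))) (fb : Option String) :
    pvLoopB records fb = ((pvLoopUS records).orElse (fun _ => fb.orElse (fun _ => pvLoopAny records))) := by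
  induction records generalizing fb with
  | nil => cases fb <;> simp [pvLoopB, pvLoopUS, pvLoopAny]
  | cons rec rest ih =>
      simp only [pvLoopB, pvLoopUS]
      by_cases ht : pvTruthy (pvGetRec rec "compositeFIGI") = true
      · obtain ⟨s, hs⟩ := pvTruthy_some ht
        rw [hs] at ht ⊢
        by_cases hu : pvIsUS rec = true
        · simp [ht, hu]
        · simp only [ht, Bool.eq_false_iff.mpr hu, Bool.and_false,
            Bool.false_eq_true, if_false, ih]
          cases fb with
          | some v => simp
          | none => simp [pvLoopAny, hs, ht]
      · have ht' : pvTruthy (pvGetRec rec "compositeFIGI") = false := Bool.eq_false_iff.mpr ht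
        simp only [ht', Bool.and_false, Bool.false_and, Bool.false_eq_true, if_false, ih]
        cases fb with
        | some v => simp
        | none => simp [pvLoopAny, ht']

-- ===== VERDICT (by name: the statement is the Claim_ definition above) =====
theorem pick_composite_figi_py_spec : Claim_equal_pick_composite_figi_py := by
  intro records _
  unfold Spec_pick_composite_figi_py pick_composite_figi_py pick_composite_figi_py_alt
  rw [pvLoopB_eq]
  cases records with
  | nil => simp [pvLoopUS, pvLoopAny, Option.orElse]
  | cons rec rest =>
      simp only [List.isEmpty_cons, if_neg (by decide : ¬ (false = true))]
      cases h : pvLoopUS (rec :: rest) <;> simp [Option.orElse]
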